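-- pv_equiv track=rewrite | github.com/LucijaZuzic/CodingSearch | Coding to search/ffsfsfsfsfsfsfs.py | find_dois_for_name
-- ===== SOURCE A (Python) =====
-- def find_dois_for_name(original_doi, name, names1, names2, names3, doi1, doi2, doi3):
--     if len(name) == 0:
--         return original_doi
--     dois = original_doi
--     for i in range(len(names1)):
--         if names1[i] == name and len(doi1[i]) != 0:
--             dois = doi1[i]
--     for i in range(len(names2)):
--         if names2[i] == name and len(doi2[i]) != 0:
--             dois = doi2[i]
--     for i in range(len(names3)):
--         if names3[i] == name and len(doi3[i]) != 0:
--             dois = doi3[i]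
--     return dois
-- ===== SOURCE B (Python) =====
-- def find_dois_for_name(original_doi, name, names1, names2, names3, doi1, doi2, doi3):
--     if len(name) == 0:
--         return original_doi
--     pairs = list(zip(names1, doi1)) + list(zip(names2, doi2)) + list(zip(names3, doi3))
--     for n, d in reversed(pairs):
--         if n == name and len(d) != 0:
--             return d
--     return original_doi
-- ===== Notes on version B (the rewrite author's own statement) =====
-- stated objective: alternative
-- what changed: B replaces the three forward index loops with a last-match accumulator by zipping each (names, dois) pair, concatenating them in priority order, and returning the first hit of a single reverse scan with early exit.
import Mathlib
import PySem

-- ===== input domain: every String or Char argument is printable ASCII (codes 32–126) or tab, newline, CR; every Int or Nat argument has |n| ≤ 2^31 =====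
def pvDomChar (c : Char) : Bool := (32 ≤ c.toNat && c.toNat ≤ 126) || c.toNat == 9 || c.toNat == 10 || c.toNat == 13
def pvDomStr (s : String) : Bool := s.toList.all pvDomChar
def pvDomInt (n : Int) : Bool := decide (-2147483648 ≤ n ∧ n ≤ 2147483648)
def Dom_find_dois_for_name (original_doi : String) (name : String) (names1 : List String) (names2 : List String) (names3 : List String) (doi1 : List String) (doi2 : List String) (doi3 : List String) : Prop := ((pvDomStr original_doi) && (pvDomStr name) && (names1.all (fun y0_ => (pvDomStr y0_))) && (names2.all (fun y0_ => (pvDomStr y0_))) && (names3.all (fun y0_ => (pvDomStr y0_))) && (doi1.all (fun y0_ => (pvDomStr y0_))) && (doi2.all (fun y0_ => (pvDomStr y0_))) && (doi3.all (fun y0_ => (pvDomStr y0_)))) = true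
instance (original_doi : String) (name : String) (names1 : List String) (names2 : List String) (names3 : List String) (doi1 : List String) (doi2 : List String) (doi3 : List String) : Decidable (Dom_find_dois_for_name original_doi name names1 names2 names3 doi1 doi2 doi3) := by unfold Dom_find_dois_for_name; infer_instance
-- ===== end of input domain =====

-- ===== PORT A =====
-- ===== PORT A =====
-- B changes the decomposition: A accumulates forward over three index loops; B flattens zipped
-- (name,doi) pairs in priority order and returns the first match of ONE reverse scan (objective: alternative).
-- Port note: Python's names1[i]/doi1[i] raise IndexError when a matching index exceeds the doi list;
-- those inputs are excluded by Pre_, so the port uses List.getD (identical to Python inside Pre_).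
def find_dois_for_name (original_doi : String) (name : String) (names1 : List String) (names2 : List String) (names3 : List String) (doi1 : List String) (doi2 : List String) (doi3 : List String) : String :=
  if name.length = 0 then original_doi
  else
    let d1 := (List.range names1.length).foldl
      (fun a i => if names1.getD i "" = name ∧ (doi1.getD i "").length ≠ 0 then doi1.getD i "" else a)
      original_doi
    let d2 := (List.range names2.length).foldl
      (fun a i => if names2.getD i "" = name ∧ (doi2.getD i "").length ≠ 0 then doi2.getD i "" else a)
      d1
    let d3 := (List.range names3.length).foldl
      (fun a i => if names3.getD i "" = name ∧ (doi3.getD i "").length ≠ 0 then doi3.getD i "" else a)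
      d2
    d3

-- ===== PORT B =====
def find_dois_for_name_alt (original_doi : String) (name : String) (names1 : List String) (names2 : List String) (names3 : List String) (doi1 : List String) (doi2 : List String) (doi3 : List String) : String :=
  if name.length = 0 then original_doi
  else
    let pairs := names1.zip doi1 ++ names2.zip doi2 ++ names3.zip doi3
    match pairs.reverse.find? (fun p => p.1 == name && p.2.length != 0) with
    | some p => p.2
    | none => original_doi

-- ===== PRECONDITION & SPEC =====
-- Pre_ excludes exactly the inputs on which A raises IndexError: a nonempty name matching
-- names_k at an index that is out of range for the corresponding doi_k list.
def Pre_find_dois_for_name (original_doi : String) (name : String) (names1 : List String) (names2 : List String) (names3 : List String) (doi1 : List String) (doi2 : List String) (doi3 : List String) : Prop :=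
  name = "" ∨
    ((∀ i ∈ List.range names1.length, names1.getD i "" = name → i < doi1.length) ∧
     (∀ i ∈ List.range names2.length, names2.getD i "" = name → i < doi2.length) ∧
     (∀ i ∈ List.range names3.length, names3.getD i "" = name → i < doi3.length))
instance (original_doi : String) (name : String) (names1 : List String) (names2 : List String) (names3 : List String) (doi1 : List String) (doi2 : List String) (doi3 : List String) : Decidable (Pre_find_dois_for_name original_doi name names1 names2 names3 doi1 doi2 doi3) := by unfold Pre_find_dois_for_name; infer_instance
def pvWitness_find_dois_for_name : String × String × List String × List String × List String × List String × List String × List String :=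
  ("10.1/orig", "ann", ["bob", "ann"], ["ann"], [], ["10.1/a", "10.1/b"], [""], [])


def Spec_find_dois_for_name (original_doi : String) (name : String) (names1 : List String) (names2 : List String) (names3 : List String) (doi1 : List String) (doi2 : List String) (doi3 : List String) (out : String) : Prop := out = find_dois_for_name_alt original_doi name names1 names2 names3 doi1 doi2 doi3
instance (original_doi : String) (name : String) (names1 : List String) (names2 : List String) (names3 : List String) (doi1 : List String) (doi2 : List String) (doi3 : List String) (out : String) : Decidable (Spec_find_dois_for_name original_doi name names1 names2 names3 doi1 doi2 doi3 out) := by unfold Spec_find_dois_for_name; infer_instance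

-- ===== CLAIM (what is proved, stated in full; the proofs are below) =====
def Claim_equal_find_dois_for_name : Prop := ∀ (original_doi : String) (name : String) (names1 : List String) (names2 : List String) (names3 : List String) (doi1 : List String) (doi2 : List String) (doi3 : List String), Dom_find_dois_for_name original_doi name names1 names2 names3 doi1 doi2 doi3 → Pre_find_dois_for_name original_doi name names1 names2 names3 doi1 doi2 doi3 → Spec_find_dois_for_name original_doi name names1 names2 names3 doi1 doi2 doi3 (find_dois_for_name original_doi name names1 names2 names3 doi1 doi2 doi3)

-- ===== LEMMAS AND PROOFS =====
-- last-overwrite fold = first match of the reversed list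
lemma pv_foldl_overwrite {α : Type} (g : α → Option String) :
    ∀ (l : List α) (acc : String),
      l.foldl (fun a x => (g x).getD a) acc = (l.reverse.findSome? g).getD acc := by
  intro l
  induction l with
  | nil => intro acc; simp
  | cons x xs ih =>
    intro acc
    simp only [List.foldl_cons, List.reverse_cons, List.findSome?_append, ih]
    cases h : xs.reverse.findSome? g <;> cases hx : g x <;> simp [hx]

-- fold over indices = fold over the list
lemma pv_foldl_range_getD {α β : Type} (d : α) (h : β → α → β) :
    ∀ (l : List α) (acc : β),
      (List.range l.length).foldl (fun a i => h a (l.getD i d)) acc = l.foldl h acc := by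
  intro l
  induction l with
  | nil => intro acc; simp
  | cons x xs ih =>
    intro acc
    simp only [List.length_cons, List.range_succ_eq_map, List.foldl_cons, List.foldl_map]
    simpa using ih (h acc x)

lemma pv_foldl_id {α β : Type} (f : β → α → β) :
    ∀ (l : List α) (acc : β), (∀ a x, x ∈ l → f a x = a) → l.foldl f acc = acc := by
  intro l
  induction l with
  | nil => intro acc _; simp
  | cons x xs ih =>
    intro acc h
    simp only [List.foldl_cons]
    rw [h acc x (by simp)]
    exact ih acc (fun a y hy => h a y (by simp [hy]))

lemma pv_findSome?_ite {α β : Type} (pred : α → Bool) (v : α → β) :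
    ∀ (l : List α),
      l.findSome? (fun x => if pred x then some (v x) else none) = (l.find? pred).map v := by
  intro l
  induction l with
  | nil => simp
  | cons x xs ih =>
    by_cases h : pred x <;> simp [h, ih]

-- per-list: A's forward index scan equals a findSome? over the reversed zip, given the Pre_ bound
lemma pv_list_eq (name : String) (names dois : List String)
    (hok : ∀ i ∈ List.range names.length, names.getD i "" = name → i < dois.length) (acc : String) :
    (List.range names.length).foldl
      (fun a i => if names.getD i "" = name ∧ (dois.getD i "").length ≠ 0 then dois.getD i "" else a) acc
    = (((names.zip dois).reverse.findSome?
        (fun p => if p.1 = name ∧ p.2.length ≠ 0 then some p.2 else none)).getD acc) := by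
  set m := min names.length dois.length with hm
  have hmle : m ≤ names.length := by omega
  -- truncate the range to m: indices in [m, names.length) never fire under hok
  obtain ⟨k, hk⟩ : ∃ k, names.length = m + k := ⟨names.length - m, by omega⟩
  have htrunc :
      (List.range names.length).foldl
        (fun a i => if names.getD i "" = name ∧ (dois.getD i "").length ≠ 0 then dois.getD i "" else a) acc
      = (List.range m).foldl
        (fun a i => if names.getD i "" = name ∧ (dois.getD i "").length ≠ 0 then dois.getD i "" else a) acc := by
    rw [hk, List.range_add, List.foldl_append]
    refine pv_foldl_id _ _ _ ?_
    intro a x hx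
    simp only [List.mem_map, List.mem_range] at hx
    obtain ⟨j, hj, rfl⟩ := hx
    have hge : m ≤ m + j := by omega
    have hlt : m + j < names.length := by omega
    rw [if_neg]
    rintro ⟨h1, h2⟩
    have := hok (m + j) (by simpa using hlt) h1
    omega
  -- fold over range m = fold over the zip
  have hzlen : (names.zip dois).length = m := by simp [hm]
  have hzip :
      (List.range m).foldl
        (fun a i => if names.getD i "" = name ∧ (dois.getD i "").length ≠ 0 then dois.getD i "" else a) acc
      = (names.zip dois).foldl
        (fun a p => if p.1 = name ∧ p.2.length ≠ 0 then p.2 else a) acc := by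
    rw [← pv_foldl_range_getD ("", "") (fun a p => if p.1 = name ∧ p.2.length ≠ 0 then p.2 else a)
          (names.zip dois) acc, hzlen]
    apply PySem.List.foldl_congr_mem
    intro a i hi
    simp only [List.mem_range] at hi
    have h1 : i < (names.zip dois).length := by omega
    have : (names.zip dois).getD i ("", "") = (names.getD i "", dois.getD i "") := by
      rw [List.getD_eq_getElem _ _ h1, List.getElem_zip,
        List.getD_eq_getElem _ _ (by omega), List.getD_eq_getElem _ _ (by omega)]
    rw [this]
  rw [htrunc, hzip]
  rw [show (fun (a : String) (p : String × String) => if p.1 = name ∧ p.2.length ≠ 0 then p.2 else a)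
      = (fun a p => ((fun (q : String × String) => if q.1 = name ∧ q.2.length ≠ 0 then some q.2 else none) p).getD a) by
    funext a p
    show _ = (if p.1 = name ∧ p.2.length ≠ 0 then some p.2 else none).getD a
    rcases Decidable.em (p.1 = name ∧ p.2.length ≠ 0) with h | h
    · rw [if_pos h, if_pos h]; simp
    · rw [if_neg h, if_neg h]; simp]
  exact pv_foldl_overwrite _ _ acc

lemma pv_pred_eq (name : String) :
    (fun (p : String × String) => if p.1 = name ∧ p.2.length ≠ 0 then some p.2 else none)
    = (fun p => if (p.1 == name && p.2.length != 0) then some p.2 else none) := by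
  funext p
  by_cases h1 : p.1 = name <;> by_cases h2 : p.2.length = 0 <;>
    simp [h1, h2]

-- ===== VERDICT (by name: the statement is the Claim_ definition above) =====
theorem find_dois_for_name_spec : Claim_equal_find_dois_for_name := by
  intro od name n1 n2 n3 d1 d2 d3 _ hpre
  unfold Spec_find_dois_for_name find_dois_for_name find_dois_for_name_alt
  by_cases hn : name.length = 0
  · simp [hn]
  · simp only [if_neg hn]
    have hname : name ≠ "" := fun h => hn (by simp [h])
    rcases hpre with h | ⟨h1, h2, h3⟩
    · exact absurd h hname
    rw [pv_list_eq name n1 d1 h1, pv_list_eq name n2 d2 h2, pv_list_eq name n3 d3 h3,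
        pv_pred_eq name, pv_findSome?_ite, pv_findSome?_ite, pv_findSome?_ite]
    rw [List.reverse_append, List.reverse_append, List.find?_append, List.find?_append]
    cases e3 : (n3.zip d3).reverse.find? (fun p => p.1 == name && p.2.length != 0) <;>
      cases e2 : (n2.zip d2).reverse.find? (fun p => p.1 == name && p.2.length != 0) <;>
        cases e1 : (n1.zip d1).reverse.find? (fun p => p.1 == name && p.2.length != 0) <;>
          simp
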